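-- pv_equiv track=rewrite | github.com/NinaMil/ninapypw | nowy.py | sweap_max
-- ===== SOURCE A (Python) =====
-- def sweap_max(a: list) -> list:
--     max_pos = 0
--     for i in range(1, len(a)):
--         if a[i] >= a[max_pos]:
--             max_pos = i
--     temp = a[0]
--     a[0] = a[max_pos]
--     a[max_pos] = temp
--     return a
-- ===== SOURCE B (Python) =====
-- def sweap_max(a: list) -> list:
--     top = a[0]
--     for x in a[1:]:
--         if x >= top:
--             top = x
--     max_pos = 0
--     for i, x in enumerate(a):
--         if x == top:
--             max_pos = i
--     a[0], a[max_pos] = a[max_pos], a[0]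
--     return a
-- ===== Notes on version B (the rewrite author's own statement) =====
-- stated objective: alternative
-- what changed: A's single fused loop that tracks the running argmax index is replaced by two separate passes: first compute the maximum value, then locate its last occurrence, then swap; same O(n) cost.
import Mathlib
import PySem

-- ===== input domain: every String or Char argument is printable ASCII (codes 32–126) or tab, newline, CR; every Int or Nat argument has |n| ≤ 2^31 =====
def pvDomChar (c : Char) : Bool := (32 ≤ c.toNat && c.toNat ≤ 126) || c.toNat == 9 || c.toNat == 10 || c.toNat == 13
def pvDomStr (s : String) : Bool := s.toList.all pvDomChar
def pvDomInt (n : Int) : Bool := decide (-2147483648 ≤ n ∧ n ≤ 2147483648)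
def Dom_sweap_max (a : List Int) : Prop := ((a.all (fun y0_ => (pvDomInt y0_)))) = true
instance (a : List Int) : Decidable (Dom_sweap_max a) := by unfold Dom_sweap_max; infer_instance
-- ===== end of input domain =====

-- B replaces A's fused find-last-argmax loop by two passes (max value, then its last index); the
-- return value is proved equal; NOTE both Pythons mutate `a` in place identically (same two writes).

-- ===== PORT A =====
-- one fused loop over indices 1..len-1 tracking the last index with a[i] >= a[max_pos], then swap
def sweap_max (a : List Int) : List Int :=
  let max_pos : Int :=
    (PySem.List.pyRange 1 (a.length : Int)).foldl
      (fun mp i => if PySem.List.pyGetD a i 0 ≥ PySem.List.pyGetD a mp 0 then i else mp) 0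
  -- temp = a[0]; a[0] = a[max_pos]; a[max_pos] = temp   (indices are in range whenever a ≠ [])
  let temp := PySem.List.pyGetD a 0 0
  let v := PySem.List.pyGetD a max_pos 0
  (a.set 0 v).set max_pos.toNat temp

-- ===== PORT B =====
-- pass 1: top = a[0]; for x in a[1:]: if x >= top: top = x
-- pass 2: max_pos = last i with a[i] == top; then a[0], a[max_pos] = a[max_pos], a[0]
def sweap_max_alt (a : List Int) : List Int :=
  let top := (a.drop 1).foldl (fun t x => if x ≥ t then x else t) (a.headD 0)
  let max_pos : Int :=
    (PySem.List.enumerate a).foldl (fun mp p => if p.2 = top then p.1 else mp) 0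
  let v := PySem.List.pyGetD a max_pos 0
  let t := PySem.List.pyGetD a 0 0
  (a.set 0 v).set max_pos.toNat t

-- ===== PRECONDITION & SPEC =====
-- Pre_ excludes only the empty list, on which A raises IndexError (a[0]); B raises there too.
def Pre_sweap_max (a : List Int) : Prop := a ≠ []
instance (a : List Int) : Decidable (Pre_sweap_max a) := by unfold Pre_sweap_max; infer_instance
def pvWitness_sweap_max : List Int := [1, 2]

def Spec_sweap_max (a : List Int) (out : List Int) : Prop := out = sweap_max_alt a
instance (a : List Int) (out : List Int) : Decidable (Spec_sweap_max a out) := by unfold Spec_sweap_max; infer_instance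

-- ===== CLAIM (what is proved, stated in full; the proofs are below) =====
def Claim_equal_sweap_max : Prop := ∀ (a : List Int), Dom_sweap_max a → Pre_sweap_max a → Spec_sweap_max a (sweap_max a)

-- ===== LEMMAS AND PROOFS =====

-- A's loop result, as a named value (for the proofs only)
def mpA (a : List Int) : Int :=
  (PySem.List.pyRange 1 (a.length : Int)).foldl
    (fun mp i => if PySem.List.pyGetD a i 0 ≥ PySem.List.pyGetD a mp 0 then i else mp) 0

def topB (a : List Int) : Int :=
  (a.drop 1).foldl (fun t x => if x ≥ t then x else t) (a.headD 0)

def mpB (a : List Int) : Int :=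
  (PySem.List.enumerate a).foldl (fun mp p => if p.2 = topB a then p.1 else mp) 0

-- foldl congruence under an invariant on the accumulator
theorem foldl_inv_congr {α β : Type} (l : List α) (f g : β → α → β) (P : β → Prop) (init : β)
    (h0 : P init)
    (hpres : ∀ acc x, x ∈ l → P acc → P (f acc x))
    (heq : ∀ acc x, x ∈ l → P acc → f acc x = g acc x) :
    l.foldl f init = l.foldl g init ∧ P (l.foldl f init) := by
  induction l generalizing init with
  | nil => exact ⟨rfl, h0⟩
  | cons y ys ih =>
    have h1 : P (f init y) := hpres init y (by simp) h0
    have h2 : f init y = g init y := heq init y (by simp) h0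
    have := ih (f init y) h1
      (fun acc x hx => hpres acc x (by simp [hx]))
      (fun acc x hx => heq acc x (by simp [hx]))
    simpa [List.foldl, h2] using this

theorem enumerate_append_singleton (l : List Int) (x : Int) (s : Int) :
    PySem.List.enumerate (l ++ [x]) s = PySem.List.enumerate l s ++ [(s + l.length, x)] := by
  induction l generalizing s with
  | nil => simp [PySem.List.enumerate]
  | cons y ys ih => simp [PySem.List.enumerate, ih (s + 1)]; ring_nf

theorem pyGetD_append_left (a b : List Int) (i : Int) (d : Int)
    (h0 : 0 ≤ i) (h1 : i < (a.length : Int)) :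
    PySem.List.pyGetD (a ++ b) i d = PySem.List.pyGetD a i d := by
  rw [PySem.List.pyGetD_eq_getElem _ d h0 (by simp; omega),
      PySem.List.pyGetD_eq_getElem _ d h0 h1]
  exact List.getElem_append_left (by omega)

-- the joint invariant of the two computations, by induction on the list from the right
theorem main_inv (a : List Int) (ha : a ≠ []) :
    mpA a = mpB a ∧ 0 ≤ mpA a ∧ mpA a < (a.length : Int) ∧
      PySem.List.pyGetD a (mpA a) 0 = topB a := by
  induction a using List.reverseRecOn with
  | nil => exact absurd rfl ha
  | append_singleton b x ih =>
    by_cases hb : b = []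
    · subst hb
      constructor
      · simp [mpA, mpB, topB, PySem.List.pyRange, PySem.List.enumerate]
      · refine ⟨?_, ?_, ?_⟩ <;>
          simp [mpA, topB, PySem.List.pyRange, PySem.List.pyGetD]
    · obtain ⟨hAB, h0, h1, hval⟩ := ih hb
      have hn1 : 1 ≤ (b.length : Int) := by
        have := List.length_pos_iff.mpr hb; omega
      -- unfold A's fold on b ++ [x]
      have hrange : PySem.List.pyRange 1 ((b ++ [x]).length : Int)
          = PySem.List.pyRange 1 (b.length : Int) ++ [(b.length : Int)] := by
        have : ((b ++ [x]).length : Int) = (b.length : Int) + 1 := by simp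
        rw [this, PySem.List.pyRange_one_succ_right hn1]
      -- on the prefix range, indexing b ++ [x] agrees with indexing b, under the bound invariant
      have hcongr := foldl_inv_congr (PySem.List.pyRange 1 (b.length : Int))
        (fun mp i => if PySem.List.pyGetD (b ++ [x]) i 0 ≥ PySem.List.pyGetD (b ++ [x]) mp 0 then i else mp)
        (fun mp i => if PySem.List.pyGetD b i 0 ≥ PySem.List.pyGetD b mp 0 then i else mp)
        (fun mp => 0 ≤ mp ∧ mp < (b.length : Int)) 0
        ⟨le_refl 0, by omega⟩
        (by intro acc i hi hacc
            have := PySem.List.mem_pyRange_one.mp hi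
            dsimp only; split <;> omega)
        (by intro acc i hi hacc
            have hi' := PySem.List.mem_pyRange_one.mp hi
            dsimp only
            rw [pyGetD_append_left b [x] i 0 (by omega) (by omega),
                pyGetD_append_left b [x] acc 0 hacc.1 hacc.2])
      have hA : mpA (b ++ [x])
          = if x ≥ topB b then (b.length : Int) else mpA b := by
        unfold mpA
        rw [hrange, List.foldl_append]
        rw [hcongr.1]
        have hlast : PySem.List.pyGetD (b ++ [x]) (b.length : Int) 0 = x := by
          rw [PySem.List.pyGetD_eq_getElem _ 0 (by omega) (by simp)]
          simp
        have hmp : PySem.List.pyGetD (b ++ [x]) (mpA b) 0 = topB b := by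
          rw [pyGetD_append_left b [x] _ 0 h0 h1]; exact hval
        simp only [List.foldl]
        rw [hlast]
        show (if x ≥ PySem.List.pyGetD (b ++ [x]) (mpA b) 0 then _ else _) = _
        rw [hmp]
      -- top of b ++ [x]
      have hhead : (b ++ [x]).headD 0 = b.headD 0 := by
        cases b with
        | nil => exact absurd rfl hb
        | cons y ys => simp
      have hdrop : (b ++ [x]).drop 1 = b.drop 1 ++ [x] := by
        cases b with
        | nil => exact absurd rfl hb
        | cons y ys => simp
      have hTop : topB (b ++ [x]) = if x ≥ topB b then x else topB b := by
        unfold topB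
        rw [hdrop, hhead, List.foldl_append]
        simp
      -- B's fold on b ++ [x]
      have hEnum := enumerate_append_singleton b x 0
      have hB : mpB (b ++ [x])
          = if x = topB (b ++ [x]) then (b.length : Int)
            else (PySem.List.enumerate b).foldl
              (fun mp p => if p.2 = topB (b ++ [x]) then p.1 else mp) 0 := by
        unfold mpB
        rw [hEnum, List.foldl_append]
        simp
      by_cases hge : x ≥ topB b
      · -- new maximum (or tie): both pick the last index
        have hTop' : topB (b ++ [x]) = x := by rw [hTop]; simp [hge]
        have hA' : mpA (b ++ [x]) = (b.length : Int) := by rw [hA]; simp [hge]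
        have hB' : mpB (b ++ [x]) = (b.length : Int) := by rw [hB, hTop']; simp
        refine ⟨by rw [hA', hB'], by rw [hA']; omega, by rw [hA']; simp, ?_⟩
        rw [hA', hTop']
        rw [PySem.List.pyGetD_eq_getElem _ 0 (by omega) (by simp)]
        simp
      · -- x < top: both keep the old position, top unchanged
        have hlt : x < topB b := by omega
        have hTop' : topB (b ++ [x]) = topB b := by rw [hTop]; simp [hge]
        have hA' : mpA (b ++ [x]) = mpA b := by rw [hA]; simp [hge]
        have hB' : mpB (b ++ [x]) = mpB b := by
          rw [hB, hTop']
          have hne : ¬ (x = topB b) := by omega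
          simp only [hne, if_false]
          rfl
        refine ⟨by rw [hA', hB', hAB], by omega, ?_, ?_⟩
        · rw [hA']; simp; omega
        · rw [hA', hTop', pyGetD_append_left b [x] _ 0 h0 h1]; exact hval

-- ===== VERDICT (by name: the statement is the Claim_ definition above) =====
theorem sweap_max_spec : Claim_equal_sweap_max := by
  intro a _ ha
  obtain ⟨hAB, _, _, _⟩ := main_inv a ha
  show sweap_max a = sweap_max_alt a
  have e1 : sweap_max a
      = (a.set 0 (PySem.List.pyGetD a (mpA a) 0)).set (mpA a).toNat (PySem.List.pyGetD a 0 0) := rfl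
  have e2 : sweap_max_alt a
      = (a.set 0 (PySem.List.pyGetD a (mpB a) 0)).set (mpB a).toNat (PySem.List.pyGetD a 0 0) := rfl
  rw [e1, e2, hAB]
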